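-- pv_equiv track=rewrite | github.com/bestrauc/advent-of-code-2023 | src/day13.py | pattern_reflection
-- ===== SOURCE A (Python) =====
-- def reflects(row: str, reflect_idx: int) -> bool:
--     """Check if a string has a reflection at the given position.
--
--     e.g. abaababc, reflect_idx=2 -> True, because aba|aba..
--     """
--     left = row[:reflect_idx]
--     right = row[reflect_idx:]
--
--     refl_len = min(len(left), len(right))
--     return left[-refl_len:] == right[:refl_len][::-1]
--
-- def reflect_idxs(row: str) -> set[int]:
--     """Get all positions that can create a reflection."""
--     return {i for i in range(1, len(row)) if reflects(row, i)}
--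
-- def pattern_reflection(pattern: list[str], prev: int = None) -> int | None:
--     """Search for reflections in each row and return the common one, if any."""
--     candidates = set(range(len(pattern[0]))) - {prev or -1}
--     for row in pattern:
--         candidates &= reflect_idxs(row)
--
--     if len(candidates) == 0:
--         return None
--
--     assert len(candidates) == 1
--     return candidates.pop()
-- ===== SOURCE B (Python) =====
-- def _mirror(row: str, i: int) -> bool:
--     m = min(i, len(row) - i)
--     if m <= 0:
--         return False
--     return all(row[i - 1 - k] == row[i + k] for k in range(m))
--
--
-- def pattern_reflection(pattern: list[str], prev: int = None) -> int | None:
--     """Scan candidate columns left to right; return the first one that mirrors every row."""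
--     width = len(pattern[0])
--     for i in range(1, width):
--         if prev is not None and i == prev:
--             continue
--         if all(_mirror(row, i) for row in pattern):
--             return i
--     return None
-- ===== Notes on version B (the rewrite author's own statement) =====
-- stated objective: faster
-- what changed: Instead of building the full reflection-index set of every row and intersecting sets, B scans candidate columns left to right and tests each column against all rows by direct character comparison with early exit on the first mismatch, returning the first (under Pre_ unique) surviving column. Pre_ excludes the empty pattern (A raises IndexError) and patterns with two or more common reflection columns (A's assert raises AssertionError).
import Mathlib
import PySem

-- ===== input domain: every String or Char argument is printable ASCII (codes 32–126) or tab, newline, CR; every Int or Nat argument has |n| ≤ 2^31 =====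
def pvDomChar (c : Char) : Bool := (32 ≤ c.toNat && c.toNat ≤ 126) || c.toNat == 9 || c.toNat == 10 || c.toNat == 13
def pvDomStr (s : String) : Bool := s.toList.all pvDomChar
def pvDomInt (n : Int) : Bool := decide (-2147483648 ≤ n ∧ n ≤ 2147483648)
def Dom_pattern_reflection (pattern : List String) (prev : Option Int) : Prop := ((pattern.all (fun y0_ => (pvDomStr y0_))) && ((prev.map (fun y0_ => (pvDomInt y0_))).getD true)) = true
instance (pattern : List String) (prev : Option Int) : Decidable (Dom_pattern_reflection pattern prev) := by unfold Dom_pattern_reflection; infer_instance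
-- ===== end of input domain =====

-- B scans candidate columns left to right, testing each against all rows by direct
-- character comparison with early exit, instead of building and intersecting per-row
-- reflection-index sets (objective: faster by constant factor / early exit).


-- ===== PORT A =====
-- reflects(row, reflect_idx): slice-based mirror test (note Python's left[-0:] = left)
def pv_reflects (row : List Char) (i : Int) : Bool :=
  let left := PySem.List.slice row none (some i)
  let right := PySem.List.slice row (some i) none
  let reflLen : Int := min (left.length : Int) (right.length : Int)
  PySem.List.slice left (some (-reflLen)) none == (PySem.List.slice right none (some reflLen)).reverse

-- reflect_idxs(row): {i for i in range(1, len(row)) if reflects(row, i)}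
def pv_reflect_idxs (row : List Char) : PySem.Set Int :=
  PySem.Set.ofList ((PySem.List.pyRange 1 ((row.length : Int))).filter (fun i => pv_reflects row i))

-- `prev or -1` (prev when truthy, else -1)
def pv_excl (prev : Option Int) : Int :=
  match prev with | none => -1 | some p => if p == 0 then -1 else p

def pattern_reflection (pattern : List String) (prev : Option Int) : Option Int :=
  match pattern with
  | [] => none  -- Python: IndexError on pattern[0]; excluded by Pre_
  | r0 :: _ =>
    -- candidates = set(range(len(pattern[0]))) - {prev or -1}
    let init : PySem.Set Int :=
      PySem.Set.diff (PySem.Set.ofList (PySem.List.pyRange 0 (PySem.Str.len r0))) [pv_excl prev]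
    -- for row in pattern: candidates &= reflect_idxs(row)
    let cands := pattern.foldl (fun c row => PySem.Set.inter c (pv_reflect_idxs row.toList)) init
    match cands with
    | [] => none       -- len(candidates) == 0
    | [c] => some c    -- assert len == 1; candidates.pop()
    | _ => none        -- Python: AssertionError; excluded by Pre_

-- ===== PORT B =====
-- _mirror(row, i): direct character comparison around column i
def pv_mirror (row : List Char) (i : Int) : Bool :=
  let m : Int := min i ((row.length : Int) - i)
  if m ≤ 0 then false
  else (PySem.List.pyRange 0 m).all
    (fun k => PySem.List.pyGetD row (i - 1 - k) ' ' == PySem.List.pyGetD row (i + k) ' ')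

-- the loop-body test: i is not the previous reflection and mirrors every row
def pv_candB (pattern : List String) (prev : Option Int) (i : Int) : Bool :=
  (match prev with | some p => !(i == p) | none => true) &&
    pattern.all (fun row => pv_mirror row.toList i)

def pattern_reflection_alt (pattern : List String) (prev : Option Int) : Option Int :=
  match pattern with
  | [] => none  -- Python: IndexError on len(pattern[0]); excluded by Pre_
  | r0 :: _ =>
    (PySem.List.pyRange 1 (PySem.Str.len r0)).find? (pv_candB pattern prev)

-- ===== PRECONDITION & SPEC =====
-- Declarative helpers for Pre_ (independent of both ports): column i mirrors row cs,
-- and the list of columns that mirror every row and are not excluded by prev.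
def pvMirrorN (cs : List Char) (i : Nat) : Bool :=
  decide (0 < i) && decide (i < cs.length) &&
    decide (∀ k < min i (cs.length - i), cs.getD (i - 1 - k) ' ' = cs.getD (i + k) ' ')

def pvCandN (pattern : List String) (prev : Option Int) (i : Nat) : Bool :=
  decide (prev ≠ some (i : Int)) && pattern.all (fun row => pvMirrorN row.toList i)

def pvKey (pattern : List String) (prev : Option Int) : List Nat :=
  (List.range (pattern.headD "").toList.length).filter (pvCandN pattern prev)

-- Pre_ excludes the empty pattern (A raises IndexError) and patterns with two or more
-- common reflection columns (A's 'assert len(candidates) == 1' raises AssertionError).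
def Pre_pattern_reflection (pattern : List String) (prev : Option Int) : Prop :=
  pattern ≠ [] ∧ (pvKey pattern prev).length ≤ 1
instance (pattern : List String) (prev : Option Int) : Decidable (Pre_pattern_reflection pattern prev) := by unfold Pre_pattern_reflection; infer_instance

def pvWitness_pattern_reflection : List String × Option Int := (["#..#", ".##."], none)

def Spec_pattern_reflection (pattern : List String) (prev : Option Int) (out : Option Int) : Prop := out = pattern_reflection_alt pattern prev
instance (pattern : List String) (prev : Option Int) (out : Option Int) : Decidable (Spec_pattern_reflection pattern prev out) := by unfold Spec_pattern_reflection; infer_instance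

-- ===== CLAIM (what is proved, stated in full; the proofs are below) =====
def Claim_equal_pattern_reflection : Prop := ∀ (pattern : List String) (prev : Option Int), Dom_pattern_reflection pattern prev → Pre_pattern_reflection pattern prev → Spec_pattern_reflection pattern prev (pattern_reflection pattern prev)

-- ===== LEMMAS AND PROOFS =====

-- crux: for 1 <= n < |cs| the slice comparison of A's reflects equals pointwise mirroring
theorem pv_reflects_eq_pointwise (cs : List Char) (n : Nat) (h1 : 1 ≤ n) (h2 : n < cs.length) :
    pv_reflects cs (n : Int)
      = decide (∀ k < min n (cs.length - n), cs.getD (n - 1 - k) ' ' = cs.getD (n + k) ' ') := by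
  unfold pv_reflects
  set L := cs.length with hL
  set m := min n (L - n) with hmdef
  have hmpos : 0 < m := by omega
  simp only [PySem.List.slice_to_natCast, PySem.List.slice_from_natCast]
  have hlt : (List.take n cs).length = n := by simp; omega
  have hrt : (List.drop n cs).length = L - n := by simp [hL]
  rw [hlt, hrt]
  have hmin : (min (n : Int) ((L - n : Nat) : Int)) = ((m : Nat) : Int) := by simp only [hmdef]; push_cast; omega
  rw [hmin, PySem.List.slice_from_neg_natCast _ m hmpos, PySem.List.slice_to_natCast, hlt]
  rw [Bool.eq_iff_iff, beq_iff_eq, decide_eq_true_eq]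
  rw [List.ext_getElem_iff]
  constructor
  · rintro ⟨-, hp⟩ k hk
    have := hp (m - 1 - k) (by simp; omega) (by simp; omega)
    rw [List.getElem_drop, List.getElem_take, List.getElem_reverse, List.getElem_take,
        List.getElem_drop] at this
    rw [List.getD_eq_getElem cs ' ' (by omega), List.getD_eq_getElem cs ' ' (by omega)]
    have e1 : n - m + (m - 1 - k) = n - 1 - k := by omega
    have e2 : n + ((List.take m (List.drop n cs)).length - 1 - (m - 1 - k)) = n + k := by
      rw [show (List.take m (List.drop n cs)).length = m by simp; omega]; omega
    simp only [e1, e2] at this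
    exact this
  · intro hp
    refine ⟨by simp; omega, ?_⟩
    intro j hj1 hj2
    have hjm : j < m := by
      have : (List.drop (n - m) (List.take n cs)).length = m := by simp; omega
      omega
    have := hp (m - 1 - j) (by omega)
    rw [List.getD_eq_getElem cs ' ' (by omega), List.getD_eq_getElem cs ' ' (by omega)] at this
    rw [List.getElem_drop, List.getElem_take, List.getElem_reverse, List.getElem_take,
        List.getElem_drop]
    have e1 : n - m + j = n - 1 - (m - 1 - j) := by omega
    have e2 : n + ((List.take m (List.drop n cs)).length - 1 - j) = n + (m - 1 - j) := by
      rw [show (List.take m (List.drop n cs)).length = m by simp; omega]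
    simp only [e1, e2]
    exact this

-- membership in A's reflect_idxs set, as the declarative mirror predicate
theorem contains_reflect (cs : List Char) (n : Nat) :
    PySem.Set.contains (pv_reflect_idxs cs) ((n : Nat) : Int) = pvMirrorN cs n := by
  unfold pv_reflect_idxs pvMirrorN
  rw [Bool.eq_iff_iff]
  simp only [PySem.Set.contains, List.contains_iff_mem, PySem.Set.mem_ofList, List.mem_filter,
    PySem.List.mem_pyRange_one, Bool.and_eq_true, decide_eq_true_eq]
  constructor
  · rintro ⟨⟨hge, hlt⟩, hr⟩
    have h1 : 1 ≤ n := by exact_mod_cast hge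
    have h2 : n < cs.length := by exact_mod_cast hlt
    refine ⟨⟨h1, h2⟩, ?_⟩
    rw [pv_reflects_eq_pointwise cs n h1 h2, decide_eq_true_eq] at hr
    exact hr
  · rintro ⟨⟨h1, h2⟩, hp⟩
    refine ⟨⟨by exact_mod_cast h1, by exact_mod_cast h2⟩, ?_⟩
    rw [pv_reflects_eq_pointwise cs n h1 h2, decide_eq_true_eq]
    exact hp

-- B's _mirror, as the declarative mirror predicate
theorem pv_mirror_eq (cs : List Char) (n : Nat) :
    pv_mirror cs ((n : Nat) : Int) = pvMirrorN cs n := by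
  unfold pv_mirror pvMirrorN
  by_cases h0 : 0 < n
  · by_cases hlen : n < cs.length
    · have hm : (min (n : Int) ((cs.length : Int) - n)) = ((min n (cs.length - n) : Nat) : Int) := by
        push_cast; omega
      rw [hm]
      rw [if_neg (by push_cast; omega)]
      rw [PySem.List.pyRange_zero_natCast, List.all_map]
      simp only [h0, hlen, decide_true, Bool.true_and]
      rw [Bool.eq_iff_iff]
      simp only [List.all_eq_true, List.mem_range, decide_eq_true_eq]
      constructor
      · intro h k hk
        have := h k hk
        simp only [Function.comp_apply] at this
        have e1 : (n : Int) - 1 - (k : Int) = ((n - 1 - k : Nat) : Int) := by omega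
        have e2 : (n : Int) + (k : Int) = ((n + k : Nat) : Int) := by omega
        rw [e1, e2, PySem.List.pyGetD_natCast, PySem.List.pyGetD_natCast, beq_iff_eq] at this
        exact this
      · intro h k hk
        have := h k hk
        have e1 : (n : Int) - 1 - (k : Int) = ((n - 1 - k : Nat) : Int) := by omega
        have e2 : (n : Int) + (k : Int) = ((n + k : Nat) : Int) := by omega
        simp only [Function.comp_apply, e1, e2, PySem.List.pyGetD_natCast, beq_iff_eq]
        exact this
    · rw [if_pos (by omega)]
      simp [hlen]
  · have : n = 0 := by omega
    subst this
    rw [if_pos (by simp)]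
    simp

-- A's intersection loop is one filter over the accumulator
theorem foldl_inter (rows : List String) (s : List Int) :
    rows.foldl (fun c row => PySem.Set.inter c (pv_reflect_idxs row.toList)) s
      = s.filter (fun i => rows.all (fun row => PySem.Set.contains (pv_reflect_idxs row.toList) i)) := by
  induction rows generalizing s with
  | nil => simp
  | cons r rs ih =>
    rw [List.foldl_cons, ih]
    show (PySem.Set.inter s (pv_reflect_idxs r.toList)).filter _ = _
    unfold PySem.Set.inter
    rw [List.filter_filter]
    apply List.filter_congr
    intro i _
    simp [List.all_cons, Bool.and_comm]

-- filtering the cast range with any predicate that agrees with pvCandN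
theorem filter_pyRange_eq (pat : List String) (prev : Option Int) (w : Nat) (F : Int → Bool)
    (hF : ∀ n : Nat, F ((n : Nat) : Int) = pvCandN pat prev n) :
    (PySem.List.pyRange 0 (w : Int)).filter F
      = ((List.range w).filter (pvCandN pat prev)).map (fun n => ((n : Nat) : Int)) := by
  rw [PySem.List.pyRange_zero_natCast, List.filter_map]
  congr 1
  apply List.filter_congr
  intro n _
  exact hF n

theorem filter_range01 (w : Nat) (F : Int → Bool) (h0 : F 0 = false) :
    (PySem.List.pyRange 1 (w : Int)).filter F = (PySem.List.pyRange 0 (w : Int)).filter F := by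
  cases w with
  | zero => simp [PySem.List.pyRange]
  | succ w' =>
    have hpos : (0 : Int) < ((w' + 1 : Nat) : Int) := by exact_mod_cast Nat.succ_pos w'
    rw [PySem.List.pyRange_one_cons hpos]
    simp [h0]

-- the head of the pattern never mirrors at column 0
theorem all_mirror_zero (r0 : String) (rest : List String) :
    (r0 :: rest).all (fun row => pvMirrorN row.toList 0) = false := by
  simp [pvMirrorN]

-- A's pointwise candidate predicate equals pvCandN
theorem FA_point (r0 : String) (rest : List String) (prev : Option Int) (n : Nat) :
    (((r0 :: rest).all (fun row => PySem.Set.contains (pv_reflect_idxs row.toList) ((n : Nat) : Int)))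
        && !(PySem.Set.contains [pv_excl prev] ((n : Nat) : Int)))
      = pvCandN (r0 :: rest) prev n := by
  simp only [contains_reflect, pvCandN]
  by_cases h0 : n = 0
  · subst h0
    simp [pvMirrorN]
  · rw [Bool.and_comm]
    congr 1
    unfold pv_excl
    rcases prev with _ | p
    · simp [PySem.Set.contains]
    · by_cases hp : p = 0
      · subst hp
        simp [PySem.Set.contains]
        omega
      · simp [PySem.Set.contains, hp]
        exact eq_comm

-- B's pointwise loop predicate equals pvCandN
theorem FB_point (r0 : String) (rest : List String) (prev : Option Int) (n : Nat) :
    pv_candB (r0 :: rest) prev ((n : Nat) : Int) = pvCandN (r0 :: rest) prev n := by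
  unfold pv_candB
  simp only [pv_mirror_eq, pvCandN]
  congr 1
  rcases prev with _ | p
  · simp
  · simp
    rw [Bool.eq_iff_iff, beq_iff_eq, decide_eq_true_eq]
    exact eq_comm

-- characterization of port A on a non-empty pattern
theorem A_char (r0 : String) (rest : List String) (prev : Option Int) :
    pattern_reflection (r0 :: rest) prev
      = (match ((List.range r0.toList.length).filter (pvCandN (r0 :: rest) prev)).map (fun n => ((n : Nat) : Int)) with
         | [] => none | [c] => some c | _ => none) := by
  rw [pattern_reflection.eq_def]
  dsimp only
  rw [foldl_inter]
  have hnd : (PySem.List.pyRange 0 ((r0.toList.length : Nat) : Int)).Nodup := by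
    rw [PySem.List.pyRange_zero_natCast]
    exact List.nodup_range.map Nat.cast_injective
  rw [PySem.Str.len_eq, PySem.Set.ofList_eq_self_of_nodup _ hnd]
  unfold PySem.Set.diff
  rw [List.filter_filter]
  rw [filter_pyRange_eq (r0 :: rest) prev r0.toList.length _ (fun n => FA_point r0 rest prev n)]
  rfl

-- characterization of port B on a non-empty pattern
theorem B_char (r0 : String) (rest : List String) (prev : Option Int) :
    pattern_reflection_alt (r0 :: rest) prev
      = (((List.range r0.toList.length).filter (pvCandN (r0 :: rest) prev)).map (fun n => ((n : Nat) : Int))).head? := by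
  rw [pattern_reflection_alt.eq_def]
  dsimp only
  rw [PySem.Str.len_eq, ← List.head?_filter]
  have hFB0 : pv_candB (r0 :: rest) prev 0 = false := by
    have := FB_point r0 rest prev 0
    simp only [Nat.cast_zero] at this
    rw [this, pvCandN, all_mirror_zero, Bool.and_false]
  rw [filter_range01 r0.toList.length _ hFB0]
  rw [filter_pyRange_eq (r0 :: rest) prev r0.toList.length _ (fun n => FB_point r0 rest prev n)]

-- ===== VERDICT (by name: the statement is the Claim_ definition above) =====
theorem pattern_reflection_spec : Claim_equal_pattern_reflection := by
  intro pattern prev _ hpre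
  obtain ⟨hne, hlen⟩ := hpre
  unfold Spec_pattern_reflection
  match pattern, hne with
  | r0 :: rest, _ =>
    rw [A_char, B_char]
    have hlen' : ((List.range r0.toList.length).filter (pvCandN (r0 :: rest) prev)).length ≤ 1 := by
      unfold pvKey at hlen
      simpa using hlen
    match hK : (List.range r0.toList.length).filter (pvCandN (r0 :: rest) prev), hlen' with
    | [], _ => rfl
    | [c], _ => rfl
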